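-- pv_equiv track=rewrite | github.com/shimingwei1277/Linux-android-arm64_lsdriver | NativeTcpBridge/windows/tcp_client.py | _collect_subnet_targets
-- ===== SOURCE A (Python) =====
-- import ipaddress
--
-- def _collect_subnet_targets(local_ips: list[str]) -> tuple[set[str], set[str]]:
--     targets: set[str] = set()
--     local_set = set(local_ips)
--     for ip_text in local_ips:
--         try:
--             network = ipaddress.ip_network(f"{ip_text}/24", strict=False)
--         except ValueError:
--             continue
--         for host in network.hosts():
--             host_text = str(host)
--             if host_text not in local_set:
--                 targets.add(host_text)
--     return targets, local_set
-- ===== SOURCE B (Python) =====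
-- def _parse_net24(ip_text: str):
--     """The /24 network of a dotted-quad IPv4 address, as an (a, b, c) triple.
--
--     Mirrors ipaddress's IPv4 text rules: exactly four octets, each 1-3 ASCII
--     digits, no leading zero, value <= 255.  Returns None where ip_network
--     would raise ValueError.  (IPv6 text is out of scope: see the claim; on
--     such input the original enumerates 2**104 hosts and never finishes.)
--     """
--     parts = ip_text.split(".")
--     if len(parts) != 4:
--         return None
--     vals = []
--     for p in parts:
--         if not (0 < len(p) <= 3 and all("0" <= c <= "9" for c in p)):
--             return None
--         if len(p) > 1 and p[0] == "0":
--             return None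
--         v = int(p)
--         if v > 255:
--             return None
--         vals.append(v)
--     return vals[0], vals[1], vals[2]
--
--
-- def _collect_subnet_targets(local_ips: list[str]) -> tuple[set[str], set[str]]:
--     # Staged pipeline instead of nested loops: (1) parse + dedup the /24
--     # networks (first-occurrence order via dict.fromkeys), (2) lay out every
--     # distinct network's 254 host strings in one flat list, (3) filter out
--     # local addresses and take the set once.
--     local_set = set(local_ips)
--     nets = list(dict.fromkeys(n for n in map(_parse_net24, local_ips) if n is not None))
--     host_list = [f"{a}.{b}.{c}." + str(d) for (a, b, c) in nets for d in range(1, 255)]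
--     targets = set(h for h in host_list if h not in local_set)
--     return targets, local_set
-- ===== Notes on version B (the rewrite author's own statement) =====
-- stated objective: faster
-- what changed: B replaces A's nested per-address host loop by a staged pipeline: it parses dotted-quad text directly (no ipaddress objects), deduplicates the /24 networks with dict.fromkeys, lays out each distinct network's 254 hosts once in a flat list and filters it against the local set in one pass; Pre_ excludes valid IPv6 text, on which A's hosts() would enumerate 2^104-1 addresses and never finish.
-- outside the precondition, e.g. on _collect_subnet_targets(['::']): A does not finish within the time limit, B returns (set(), {'::'})
import Mathlib
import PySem

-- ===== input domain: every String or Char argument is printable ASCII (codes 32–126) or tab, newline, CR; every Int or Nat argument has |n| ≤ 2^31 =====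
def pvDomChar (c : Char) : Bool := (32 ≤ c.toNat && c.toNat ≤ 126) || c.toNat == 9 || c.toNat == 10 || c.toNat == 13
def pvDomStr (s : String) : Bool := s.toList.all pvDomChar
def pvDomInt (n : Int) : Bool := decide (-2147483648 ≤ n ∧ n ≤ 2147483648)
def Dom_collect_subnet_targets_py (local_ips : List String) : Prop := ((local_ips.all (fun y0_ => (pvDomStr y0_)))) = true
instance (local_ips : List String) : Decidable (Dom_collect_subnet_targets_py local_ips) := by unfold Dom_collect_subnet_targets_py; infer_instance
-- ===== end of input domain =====

-- B is a staged pipeline (parse+dedup the /24 networks, flat host list of the distinct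
-- networks, one filter, one set()) where A re-enumerates a network's 254 hosts for every
-- duplicate local address of that /24.  Both ports model ipaddress.ip_network(f"{ip}/24",
-- strict=False) restricted to IPv4 text (Pre_ excludes valid IPv6 text, see Pre_ below);
-- .hosts() of an IPv4 /24 is a.b.c.1 … a.b.c.254.

-- ===== PORT A =====
-- model of ipaddress's IPv4 octet parse: 1–3 ASCII digits, no leading zero, int(p) ≤ 255
def pvOctet? (p : List Char) : Option Int :=
  if p ≠ [] ∧ p.all Char.isDigit ∧ p.length ≤ 3 ∧ (p.length = 1 ∨ p.headD ' ' ≠ '0') then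
    match PySem.Int.ofStr? (String.ofList p) with
    | some v => if v ≤ 255 then some v else none
    | none => none
  else none

-- model of ipaddress.ip_network(f"{s}/24", strict=False).network_address for IPv4 text:
-- the first three octets of the dotted quad (the /24 network); none = ValueError (skipped)
def pvNet? (s : String) : Option (Int × Int × Int) :=
  match PySem.Chars.splitOn s.toList ['.'] with
  | [p, q, r, t] =>
    match pvOctet? p, pvOctet? q, pvOctet? r, pvOctet? t with
    | some a, some b, some c, some _ => some (a, b, c)
    | _, _, _, _ => none
  | _ => none

-- str(host) for every host of the /24 network a.b.c.0/24, in hosts() order: a.b.c.1 … a.b.c.254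
def pvHosts (n : Int × Int × Int) : List String :=
  (PySem.List.pyRange 1 255 1).map (fun d =>
    PySem.Int.toStr n.1 ++ "." ++ PySem.Int.toStr n.2.1 ++ "." ++ PySem.Int.toStr n.2.2 ++ "." ++ PySem.Int.toStr d)

def collect_subnet_targets_py (local_ips : List String) : List String × List String :=
  let local_set : PySem.Set String := PySem.Set.ofList local_ips
  let targets : PySem.Set String :=
    local_ips.foldl (fun ts ip_text =>
      match pvNet? ip_text with
      | none => ts
      | some network =>
        (pvHosts network).foldl (fun ts host_text =>
          if PySem.Set.contains local_set host_text then ts else PySem.Set.add ts host_text) ts)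
      PySem.Set.empty
  (targets, local_set)

-- ===== PORT B =====
-- _parse_net24's octet test: 0 < len(p) <= 3, all chars '0'..'9', no leading zero, int(p) <= 255
def altOctet? (p : List Char) : Option Int :=
  if (0 < p.length ∧ p.length ≤ 3) ∧ p.all (fun c => '0' ≤ c && c ≤ '9') then
    if 1 < p.length ∧ p.headD ' ' = '0' then none
    else
      match PySem.Int.ofStr? (String.ofList p) with
      | some v => if v > 255 then none else some v
      | none => none
  else none

-- the vals-collecting loop of _parse_net24 (None as soon as one octet fails)
def altOctets? : List (List Char) → Option (List Int)
  | [] => some []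
  | p :: ps =>
    match altOctet? p, altOctets? ps with
    | some v, some vs => some (v :: vs)
    | _, _ => none

def alt_parse_net24? (s : String) : Option (Int × Int × Int) :=
  let parts := PySem.Chars.splitOn s.toList ['.']
  if parts.length ≠ 4 then none
  else
    match altOctets? parts with
    | some [a, b, c, _] => some (a, b, c)
    | _ => none

-- f"{a}.{b}.{c}." + str(d) for d in range(1, 255)
def altHosts (n : Int × Int × Int) : List String :=
  let pre := PySem.Int.toStr n.1 ++ "." ++ PySem.Int.toStr n.2.1 ++ "." ++ PySem.Int.toStr n.2.2 ++ "."
  (PySem.List.pyRange 1 255 1).map (fun d => pre ++ PySem.Int.toStr d)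

def collect_subnet_targets_py_alt (local_ips : List String) : List String × List String :=
  let local_set : PySem.Set String := PySem.Set.ofList local_ips
  let nets : List (Int × Int × Int) := PySem.List.dedup (local_ips.filterMap alt_parse_net24?)
  let host_list : List String := nets.flatMap altHosts
  let targets : PySem.Set String :=
    PySem.Set.ofList (host_list.filter (fun h => !(PySem.Set.contains local_set h)))
  (targets, local_set)

-- ===== PRECONDITION & SPEC =====
-- Pre_ excludes inputs containing valid IPv6 address text (with or without a %scope):
-- on those, A builds an IPv6 /24 network and hosts() enumerates 2^104 - 1 addresses, so
-- A never finishes in practice; everything else (all IPv4 and all ValueError text) is admitted.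
def pvIsHex (c : Char) : Bool := c.isDigit || ('a' ≤ c && c ≤ 'f') || ('A' ≤ c && c ≤ 'F')

def pvHextet (p : List Char) : Bool := 1 ≤ p.length && p.length ≤ 4 && p.all pvIsHex

def pvV4 (cs : List Char) : Bool :=
  match PySem.Chars.splitOn cs ['.'] with
  | [p, q, r, t] => (pvOctet? p).isSome && (pvOctet? q).isSome && (pvOctet? r).isSome && (pvOctet? t).isSome
  | _ => false

def pvV6core (cs : List Char) : Bool :=
  let parts0 := PySem.Chars.splitOn cs [':']
  if parts0.length < 3 then false
  else
    let last := (parts0.getLast? ).getD []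
    if last.contains '.' && !(pvV4 last) then false
    else
      let parts := if last.contains '.' then parts0.dropLast ++ [['0'], ['0']] else parts0
      if parts.length > 9 then false
      else
        let interior := (parts.drop 1).dropLast
        let skips := interior.count []
        if skips > 1 then false
        else if skips = 1 then
          let skip := 1 + interior.idxOf []
          let headEmpty := parts.headD ['x'] = []
          let lastEmpty := (parts.getLast?).getD ['x'] = []
          let hi := if headEmpty then skip - 1 else skip
          let lo := if lastEmpty then parts.length - skip - 2 else parts.length - skip - 1
          (!headEmpty || skip = 1) && (!lastEmpty || skip = parts.length - 2) &&
          (hi + lo < 8) &&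
          (parts.take hi).all pvHextet && (parts.drop (parts.length - lo)).all pvHextet
        else
          parts.length = 8 && parts.headD [] ≠ [] && (parts.getLast?).getD [] ≠ [] &&
          parts.all pvHextet

def pvV6 (cs : List Char) : Bool :=
  if cs.contains '%' then
    let addr := cs.takeWhile (· ≠ '%')
    let scope := (cs.dropWhile (· ≠ '%')).drop 1
    scope ≠ [] && !(scope.contains '%') && pvV6core addr
  else pvV6core cs

-- a string on which ip_network(f"{s}/24") parses as an IPv6 network ('/' in s makes it raise first)
def pvIsIPv6Text (s : String) : Bool := !(s.toList.contains '/') && pvV6 s.toList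

def Pre_collect_subnet_targets_py (local_ips : List String) : Prop :=
  local_ips.all (fun s => !(pvIsIPv6Text s)) = true
instance (local_ips : List String) : Decidable (Pre_collect_subnet_targets_py local_ips) := by
  unfold Pre_collect_subnet_targets_py; infer_instance

def pvWitness_collect_subnet_targets_py : List String := ["10.0.0.1", "10.0.0.2", "not an ip"]

def Spec_collect_subnet_targets_py (local_ips : List String) (out : List String × List String) : Prop := out = collect_subnet_targets_py_alt local_ips
instance (local_ips : List String) (out : List String × List String) : Decidable (Spec_collect_subnet_targets_py local_ips out) := by unfold Spec_collect_subnet_targets_py; infer_instance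

-- ===== CLAIM (what is proved, stated in full; the proofs are below) =====
def Claim_equal_collect_subnet_targets_py : Prop := ∀ (local_ips : List String), Dom_collect_subnet_targets_py local_ips → Pre_collect_subnet_targets_py local_ips → Spec_collect_subnet_targets_py local_ips (collect_subnet_targets_py local_ips)

-- ===== LEMMAS AND PROOFS =====

-- the two octet parsers agree
theorem octet_eq (p : List Char) : altOctet? p = pvOctet? p := by
  unfold altOctet? pvOctet?
  by_cases h0 : p = []
  · simp [h0]
  · have hlen : 0 < p.length := List.length_pos_iff.2 h0
    by_cases hall : p.all Char.isDigit = true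
    · have hall' : p.all (fun c => '0' <= c && c <= '9') = true := by
        simpa [Char.isDigit] using hall
      by_cases h3 : p.length <= 3
      · rw [if_pos ⟨⟨hlen, h3⟩, hall'⟩]
        by_cases hz : 1 < p.length ∧ p.headD ' ' = '0'
        · rw [if_pos hz, if_neg]
          rintro ⟨-, -, -, h1 | hne⟩
          · have := hz.1; omega
          · exact hne hz.2
        · have hlast : p.length = 1 ∨ p.headD ' ' ≠ '0' := by
            by_cases h1 : p.length = 1
            · exact Or.inl h1
            · exact Or.inr (fun hc => hz ⟨by omega, hc⟩)
          rw [if_neg hz, if_pos ⟨h0, hall, h3, hlast⟩]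
          cases hv : PySem.Int.ofStr? (String.ofList p) with
          | none => rfl
          | some v =>
            by_cases h255 : v <= 255
            · simp only [if_neg (show ¬ v > 255 by omega), if_pos h255]
            · simp only [if_pos (show v > 255 by omega), if_neg h255]
      · rw [if_neg (fun hcon => h3 hcon.1.2), if_neg (fun hcon => h3 hcon.2.2.1)]
    · have hall' : ¬ p.all (fun c => '0' <= c && c <= '9') = true := by
        simpa [Char.isDigit] using hall
      rw [if_neg (fun hcon => hall' hcon.2), if_neg (fun hcon => hall hcon.2.1)]

-- and hence the two network parsers
theorem net_eq (s : String) : alt_parse_net24? s = pvNet? s := by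
  unfold alt_parse_net24? pvNet?
  rcases h : PySem.Chars.splitOn s.toList ['.'] with _ | ⟨p, _ | ⟨q, _ | ⟨r, _ | ⟨t, _ | ⟨u, rest⟩⟩⟩⟩⟩ <;>
    simp_all [altOctets?, octet_eq]
  cases pvOctet? p <;> cases pvOctet? q <;> cases pvOctet? r <;> cases pvOctet? t <;> rfl

-- and the two host-string builders
theorem hosts_eq (n : Int × Int × Int) : altHosts n = pvHosts n := by
  unfold altHosts pvHosts
  simp [String.append_assoc]

-- the inner host loop of A, with the local set fixed
def pvStep (locals : List String) (ts : List String) (h : String) : List String :=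
  if PySem.Set.contains locals h then ts else PySem.Set.add ts h

def pvAddH (locals : List String) (ts : List String) (n : Int × Int × Int) : List String :=
  (pvHosts n).foldl (pvStep locals) ts

-- "ts already contains every host of n that the filter lets through"
def pvSat (locals ts : List String) (n : Int × Int × Int) : Prop :=
  ∀ h ∈ pvHosts n, PySem.Set.contains locals h = false → h ∈ ts

-- the list of networks Set.add appends to acc when folded over l (first occurrences not in acc)
def pvNew (acc : List (Int × Int × Int)) : List (Int × Int × Int) → List (Int × Int × Int)
  | [] => []
  | x :: xs => if x ∈ acc then pvNew acc xs else x :: pvNew (acc ++ [x]) xs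

theorem pvFoldMatch {β : Type} (g : β → (Int × Int × Int) → β) :
    ∀ (l : List String) (b : β),
      l.foldl (fun b ip => match pvNet? ip with | none => b | some n => g b n) b
        = (l.filterMap pvNet?).foldl g b := by
  intro l
  induction l with
  | nil => intro b; rfl
  | cons x xs ih =>
    intro b
    cases hx : pvNet? x <;> simp [hx, ih]

theorem pvFoldAdd_eq_new :
    ∀ (l acc : List (Int × Int × Int)),
      l.foldl PySem.Set.add acc = acc ++ pvNew acc l := by
  intro l
  induction l with
  | nil => intro acc; simp [pvNew]
  | cons x xs ih =>
    intro acc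
    by_cases hx : x ∈ acc
    · simp [pvNew, hx, ih]
    · simp [pvNew, hx, ih (acc ++ [x])]

theorem pvStep_mono (locals : List String) {x : String} {ts : List String} (h : x ∈ ts)
    (y : String) : x ∈ pvStep locals ts y := by
  unfold pvStep
  split
  · exact h
  · exact (PySem.Set.mem_add _ _ _).2 (Or.inl h)

theorem pvFold_mono (locals : List String) :
    ∀ (l : List String) {x : String} {ts : List String}, x ∈ ts → x ∈ l.foldl (pvStep locals) ts := by
  intro l
  induction l with
  | nil => intro x ts h; exact h
  | cons y ys ih => intro x ts h; exact ih (pvStep_mono locals h y)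

theorem pvAddH_mono (locals : List String) {x : String} {ts : List String} (h : x ∈ ts)
    (n : Int × Int × Int) : x ∈ pvAddH locals ts n :=
  pvFold_mono locals (pvHosts n) h

theorem pvFold_self (locals : List String) :
    ∀ (l : List String) (ts : List String) {x : String}, x ∈ l →
      PySem.Set.contains locals x = false → x ∈ l.foldl (pvStep locals) ts := by
  intro l
  induction l with
  | nil => intro ts x h; cases h
  | cons y ys ih =>
    intro ts x hx hc
    rcases List.mem_cons.1 hx with rfl | hx'
    · apply pvFold_mono locals ys
      unfold pvStep
      rw [hc]
      exact (PySem.Set.mem_add _ _ _).2 (Or.inr rfl)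
    · rw [List.foldl_cons]
      exact ih (pvStep locals ts y) hx' hc

theorem pvSat_addH (locals ts : List String) (n : Int × Int × Int) :
    pvSat locals (pvAddH locals ts n) n := by
  intro h hmem hc
  exact pvFold_self locals (pvHosts n) ts hmem hc

theorem pvSat_mono (locals : List String) {ts : List String} {n : Int × Int × Int}
    (hs : pvSat locals ts n) (m : Int × Int × Int) : pvSat locals (pvAddH locals ts m) n := by
  intro h hmem hc
  exact pvAddH_mono locals (hs h hmem hc) m

theorem pvFold_id (locals : List String) :
    ∀ (l : List String) (ts : List String),
      (∀ h ∈ l, PySem.Set.contains locals h = false → h ∈ ts) →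
      l.foldl (pvStep locals) ts = ts := by
  intro l
  induction l with
  | nil => intro ts _; rfl
  | cons y ys ih =>
    intro ts hsat
    have hy : pvStep locals ts y = ts := by
      unfold pvStep
      cases hc : PySem.Set.contains locals y
      · exact PySem.Set.add_of_mem (hsat y (List.mem_cons_self) hc)
      · rfl
    rw [List.foldl_cons, hy]
    exact ih ts (fun h hm => hsat h (List.mem_cons_of_mem y hm))

theorem pvAddH_id (locals ts : List String) {n : Int × Int × Int} (hs : pvSat locals ts n) :
    pvAddH locals ts n = ts :=
  pvFold_id locals (pvHosts n) ts hs

theorem pvFold_new (locals : List String) :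
    ∀ (l acc : List (Int × Int × Int)) (ts : List String),
      (∀ n ∈ acc, pvSat locals ts n) →
      (pvNew acc l).foldl (pvAddH locals) ts = l.foldl (pvAddH locals) ts := by
  intro l
  induction l with
  | nil => intro acc ts _; rfl
  | cons x xs ih =>
    intro acc ts hsat
    by_cases hx : x ∈ acc
    · rw [pvNew, if_pos hx, List.foldl_cons, pvAddH_id locals ts (hsat x hx)]
      exact ih acc ts hsat
    · rw [pvNew, if_neg hx, List.foldl_cons, List.foldl_cons]
      apply ih (acc ++ [x])
      intro n hn
      rcases List.mem_append.1 hn with hn' | hn'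
      · exact pvSat_mono locals (hsat n hn') x
      · rw [List.mem_singleton.1 hn']
        exact pvSat_addH locals ts x

-- B's "filter then Set.add-fold" equals A's filtered step, over any host list
theorem pvFilter_fold (locals : List String) :
    ∀ (l : List String) (ts : List String),
      (l.filter (fun h => !(PySem.Set.contains locals h))).foldl PySem.Set.add ts
        = l.foldl (pvStep locals) ts := by
  intro l
  induction l with
  | nil => intro ts; rfl
  | cons y ys ih =>
    intro ts
    rw [List.filter_cons]
    cases hc : PySem.Set.contains locals y
    · have hstep : pvStep locals ts y = PySem.Set.add ts y := by unfold pvStep; rw [hc]; rfl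
      rw [show (!false) = true from rfl, if_pos rfl, List.foldl_cons, List.foldl_cons, hstep, ih]
    · have hstep : pvStep locals ts y = ts := by unfold pvStep; rw [hc]; rfl
      rw [show (!true) = false from rfl, if_neg Bool.false_ne_true, List.foldl_cons, hstep, ih]

-- folding the host step over a flatMap = folding pvAddH over the networks
theorem pvFlatMap_fold (locals : List String) :
    ∀ (ns : List (Int × Int × Int)) (ts : List String),
      (ns.flatMap pvHosts).foldl (pvStep locals) ts = ns.foldl (pvAddH locals) ts := by
  intro ns
  induction ns with
  | nil => intro ts; rfl
  | cons n ms ih =>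
    intro ts
    rw [List.flatMap_cons, List.foldl_append, List.foldl_cons]
    exact ih _

-- ===== VERDICT (by name: the statement is the Claim_ definition above) =====
theorem collect_subnet_targets_py_spec : Claim_equal_collect_subnet_targets_py := by
  intro local_ips _ _
  unfold Spec_collect_subnet_targets_py collect_subnet_targets_py collect_subnet_targets_py_alt
  have hfm : local_ips.filterMap alt_parse_net24? = local_ips.filterMap pvNet? :=
    congrArg (fun f => List.filterMap f local_ips) (funext net_eq)
  have hnets : PySem.List.dedup (local_ips.filterMap alt_parse_net24?)
      = pvNew [] (local_ips.filterMap pvNet?) := by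
    rw [hfm, PySem.List.dedup_eq_ofList, PySem.Set.ofList_eq_foldl,
        pvFoldAdd_eq_new, List.nil_append]
  have haltH : (PySem.List.dedup (local_ips.filterMap alt_parse_net24?)).flatMap altHosts
      = (pvNew [] (local_ips.filterMap pvNet?)).flatMap pvHosts := by
    rw [hnets]
    exact congrArg (fun f => List.flatMap f (pvNew [] (local_ips.filterMap pvNet?)))
      (funext hosts_eq)
  have key :
      (local_ips.foldl (fun ts ip =>
          match pvNet? ip with
          | none => ts
          | some n => pvAddH (PySem.Set.ofList local_ips) ts n) PySem.Set.empty)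
        = PySem.Set.ofList
            (((PySem.List.dedup (local_ips.filterMap alt_parse_net24?)).flatMap altHosts).filter
              (fun h => !(PySem.Set.contains (PySem.Set.ofList local_ips) h))) := by
    rw [haltH, pvFoldMatch (g := pvAddH (PySem.Set.ofList local_ips))]
    generalize PySem.Set.ofList local_ips = L
    rw [PySem.Set.ofList_eq_foldl, pvFilter_fold L, pvFlatMap_fold L]
    exact (pvFold_new L (local_ips.filterMap pvNet?) [] _
      (by intro n hn; cases hn)).symm
  exact congrArg (fun t => (t, PySem.Set.ofList local_ips)) key
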